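-- pv_equiv track=rewrite | github.com/ht38nhatphan/Learn_code_algortithm | cod/leetcode/spiralOrder.py | outline
-- ===== SOURCE A (Python) =====
-- def outline(matrix,m,n):
--     # Duyệt qua vòng ngoài của ma trận và hiển thị giá trị
--     outer_ring_values,arr1,arr2,arrnew = [],[],[],[]
--     matrixnew = []
--     for i in range(m):
--         check = False
--         for j in range(n):
--             if i == 0 or j == n - 1:
--                 outer_ring_values.append(matrix[i][j])
--                 check = True
--             if j == 0 and check == False:
--                 arr1.append(matrix[i][j])
--                 check = True
--             if i == m-1 and check == False:
--                 arr2.append(matrix[i][j])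
--                 check = True
--             if check == False:
--                 arrnew.append(matrix[i][j])
--             check = False
--         if(len(arrnew)!=0):
--             matrixnew.append(arrnew)
--             arrnew = []
--     fullarr = outer_ring_values + arr2[::-1] +arr1[::-1]
--     return fullarr,matrixnew
-- ===== SOURCE B (Python) =====
-- def outline(matrix, m, n):
--     if m <= 0 or n <= 0:
--         return [], []
--     ring = matrix[0][:n]
--     ring = ring + [matrix[i][n - 1] for i in range(1, m)]
--     if m > 1:
--         ring = ring + [matrix[m - 1][j] for j in range(n - 2, 0, -1)]
--     if n > 1:
--         ring = ring + [matrix[i][0] for i in range(m - 1, 0, -1)]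
--     inner = [matrix[i][1:n - 1] for i in range(1, m - 1)]
--     return ring, [r for r in inner if r]
-- ===== Notes on version B (the rewrite author's own statement) =====
-- stated objective: simpler
-- what changed: Replaced the fused per-cell classifier double loop (with a check flag and four accumulators) by four side-specific slice/comprehension passes for the ring plus one slicing comprehension for the interior, guarded for single-row/single-column shapes.
import Mathlib
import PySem

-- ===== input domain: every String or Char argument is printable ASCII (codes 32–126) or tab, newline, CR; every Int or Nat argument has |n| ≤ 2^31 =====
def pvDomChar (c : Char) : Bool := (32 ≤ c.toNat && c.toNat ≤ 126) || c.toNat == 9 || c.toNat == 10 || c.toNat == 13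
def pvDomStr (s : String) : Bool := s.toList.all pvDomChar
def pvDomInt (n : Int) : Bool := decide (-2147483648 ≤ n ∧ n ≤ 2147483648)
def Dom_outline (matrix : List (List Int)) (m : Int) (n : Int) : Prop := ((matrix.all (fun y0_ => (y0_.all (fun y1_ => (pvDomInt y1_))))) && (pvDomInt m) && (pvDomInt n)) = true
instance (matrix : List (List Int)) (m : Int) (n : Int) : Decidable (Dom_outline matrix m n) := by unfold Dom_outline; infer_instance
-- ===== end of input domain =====

-- B replaces A's fused per-cell classifier double loop by four side-specific slice/map passes
-- (top row, right column, reversed bottom interior, reversed left column) plus a slicing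
-- comprehension for the interior rows: simpler decomposition, same O(m*n) cost.


-- ===== PORT A =====
-- matrix[i][j]; exact under Pre_outline (every accessed index in range)
def pvGet (matrix : List (List Int)) (i j : Int) : Int :=
  PySem.List.pyGetD (PySem.List.pyGetD matrix i []) j 0

-- A's inner-loop body: 'check' is reset to False at each j, so the four check-guarded ifs
-- are exactly this ordered branch chain (state = (outer_ring_values, arr1, arr2, arrnew)).
def cellStep (matrix : List (List Int)) (m n i : Int)
    (st : List Int × List Int × List Int × List Int) (j : Int) :
    List Int × List Int × List Int × List Int :=
  if i = 0 ∨ j = n - 1 then (st.1 ++ [pvGet matrix i j], st.2.1, st.2.2.1, st.2.2.2)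
  else if j = 0 then (st.1, st.2.1 ++ [pvGet matrix i j], st.2.2.1, st.2.2.2)
  else if i = m - 1 then (st.1, st.2.1, st.2.2.1 ++ [pvGet matrix i j], st.2.2.2)
  else (st.1, st.2.1, st.2.2.1, st.2.2.2 ++ [pvGet matrix i j])

-- A's outer-loop body: run the j-loop with a fresh arrnew, then append it to matrixnew if nonempty
def rowStep (matrix : List (List Int)) (m n : Int)
    (st : List Int × List Int × List Int × List (List Int)) (i : Int) :
    List Int × List Int × List Int × List (List Int) :=
  let r := (PySem.List.pyRange 0 n 1).foldl (cellStep matrix m n i) (st.1, st.2.1, st.2.2.1, [])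
  (r.1, r.2.1, r.2.2.1, if r.2.2.2.length ≠ 0 then st.2.2.2 ++ [r.2.2.2] else st.2.2.2)

def outline (matrix : List (List Int)) (m : Int) (n : Int) : List Int × List (List Int) :=
  let s := (PySem.List.pyRange 0 m 1).foldl (rowStep matrix m n) ([], [], [], [])
  (s.1 ++ ((PySem.List.slice? s.2.2.1 none none (-1)).getD [])
       ++ ((PySem.List.slice? s.2.1 none none (-1)).getD []), s.2.2.2)

-- ===== PORT B =====
def outline_alt (matrix : List (List Int)) (m : Int) (n : Int) : List Int × List (List Int) :=
  if m ≤ 0 ∨ n ≤ 0 then ([], [])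
  else
    let ring := PySem.List.slice (PySem.List.pyGetD matrix 0 []) none (some n)
    let ring := ring ++ (PySem.List.pyRange 1 m 1).map (fun i => pvGet matrix i (n - 1))
    let ring := if 1 < m then
        ring ++ (PySem.List.pyRange (n - 2) 0 (-1)).map (fun j => pvGet matrix (m - 1) j)
      else ring
    let ring := if 1 < n then
        ring ++ (PySem.List.pyRange (m - 1) 0 (-1)).map (fun i => pvGet matrix i 0)
      else ring
    let inner := (PySem.List.pyRange 1 (m - 1) 1).map
        (fun i => PySem.List.slice (PySem.List.pyGetD matrix i []) (some 1) (some (n - 1)))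
    (ring, inner.filter (· ≠ []))

-- ===== PRECONDITION & SPEC =====
-- Pre_ excludes exactly the inputs where A raises IndexError: when the j-loop runs (0 < n),
-- every row index below m and column index below n must be in range.
def Pre_outline (matrix : List (List Int)) (m : Int) (n : Int) : Prop :=
  0 < n → (m ≤ (matrix.length : Int) ∧ ∀ row ∈ matrix.take m.toNat, n ≤ (row.length : Int))
instance (matrix : List (List Int)) (m : Int) (n : Int) : Decidable (Pre_outline matrix m n) := by
  unfold Pre_outline; infer_instance
def pvWitness_outline : List (List Int) × Int × Int := ([[1, 2, 3], [4, 5, 6], [7, 8, 9]], 3, 3)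
def Spec_outline (matrix : List (List Int)) (m : Int) (n : Int) (out : List Int × List (List Int)) : Prop := out = outline_alt matrix m n
instance (matrix : List (List Int)) (m : Int) (n : Int) (out : List Int × List (List Int)) : Decidable (Spec_outline matrix m n out) := by unfold Spec_outline; infer_instance

-- ===== CLAIM (what is proved, stated in full; the proofs are below) =====
def Claim_equal_outline : Prop := ∀ (matrix : List (List Int)) (m : Int) (n : Int), Dom_outline matrix m n → Pre_outline matrix m n → Spec_outline matrix m n (outline matrix m n)



-- ===== LEMMAS AND PROOFS =====

-- reversing an ascending pyRange gives the corresponding descending one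
theorem pv_reverse_pyRange_one (a b : Int) :
    (PySem.List.pyRange a b 1).reverse = PySem.List.pyRange (b - 1) (a - 1) (-1) := by
  rw [PySem.List.pyRange_one a b, PySem.List.pyRange_neg_one (b - 1) (a - 1)]
  have hK : (b - 1 - (a - 1)).toNat = (b - a).toNat := by omega
  rw [hK, ← List.map_reverse]
  by_cases h : b ≤ a
  · have h0 : (b - a).toNat = 0 := by omega
    simp [h0]
  · apply List.ext_getElem
    · simp
    · intro k h1 h2
      simp only [List.getElem_map, List.getElem_reverse, List.length_range, List.getElem_range]
      have hk : k < (b - a).toNat := by simpa using h2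
      omega

-- reversed comprehension over an ascending range = comprehension over the descending range
theorem pv_map_rev (f : Int → Int) (a b : Int) :
    ((PySem.List.pyRange a b 1).map f).reverse = (PySem.List.pyRange (b - 1) (a - 1) (-1)).map f := by
  rw [← pv_reverse_pyRange_one]
  simp

-- '[xs[j] for j in range(a, b)]' is the slice xs[a:b] when all indices are in range
theorem pv_map_pyGetD_slice (xs : List Int) (a b : Int) (h0 : 0 ≤ a) (hab : a ≤ b)
    (hb : b ≤ (xs.length : Int)) :
    (PySem.List.pyRange a b 1).map (fun j => PySem.List.pyGetD xs j 0) =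
      PySem.List.slice xs (some a) (some b) := by
  rw [PySem.List.pyRange_one a b, PySem.List.slice_toNat xs h0 (le_trans h0 hab)]
  apply List.ext_getElem
  · simp
    omega
  · intro k h1 h2
    simp only [List.getElem_map, List.getElem_range, List.getElem_take, List.getElem_drop]
    have hk : k < (b - a).toNat := by simpa using h1
    rw [PySem.List.pyGetD_eq_getElem xs 0 (by omega) (by omega)]
    have hidx : (a + (k : Int)).toNat = a.toNat + k := by omega
    simp [hidx]

-- inner loop over cells that all take the first (outer-ring) branch
theorem pv_foldCell_first (matrix : List (List Int)) (m n i : Int) (l : List Int)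
    (h : ∀ j ∈ l, i = 0 ∨ j = n - 1) :
    ∀ o a1 a2 an : List Int, l.foldl (cellStep matrix m n i) (o, a1, a2, an) =
      (o ++ l.map (pvGet matrix i), a1, a2, an) := by
  induction l with
  | nil => intro o a1 a2 an; simp
  | cons j t ih =>
    intro o a1 a2 an
    have hstep : cellStep matrix m n i (o, a1, a2, an) j =
        (o ++ [pvGet matrix i j], a1, a2, an) := by
      simp only [cellStep]
      rw [if_pos (h j (by simp))]
    rw [List.foldl_cons, hstep, ih (fun x hx => h x (List.mem_cons_of_mem _ hx))]
    simp

-- inner loop over interior cells of a non-bottom row (fourth branch: arrnew)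
theorem pv_foldCell_interior (matrix : List (List Int)) (m n i : Int) (l : List Int)
    (h : ∀ j ∈ l, ¬(i = 0 ∨ j = n - 1) ∧ j ≠ 0 ∧ i ≠ m - 1) :
    ∀ o a1 a2 an : List Int, l.foldl (cellStep matrix m n i) (o, a1, a2, an) =
      (o, a1, a2, an ++ l.map (pvGet matrix i)) := by
  induction l with
  | nil => intro o a1 a2 an; simp
  | cons j t ih =>
    intro o a1 a2 an
    obtain ⟨h1, h2, h3⟩ := h j (by simp)
    have hstep : cellStep matrix m n i (o, a1, a2, an) j =
        (o, a1, a2, an ++ [pvGet matrix i j]) := by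
      simp only [cellStep]
      rw [if_neg h1, if_neg h2, if_neg h3]
    rw [List.foldl_cons, hstep, ih (fun x hx => h x (List.mem_cons_of_mem _ hx))]
    simp

-- inner loop over interior cells of the bottom row (third branch: arr2)
theorem pv_foldCell_bottom (matrix : List (List Int)) (m n i : Int) (l : List Int)
    (hi : i = m - 1) (h : ∀ j ∈ l, ¬(i = 0 ∨ j = n - 1) ∧ j ≠ 0) :
    ∀ o a1 a2 an : List Int, l.foldl (cellStep matrix m n i) (o, a1, a2, an) =
      (o, a1, a2 ++ l.map (pvGet matrix i), an) := by
  induction l with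
  | nil => intro o a1 a2 an; simp
  | cons j t ih =>
    intro o a1 a2 an
    obtain ⟨h1, h2⟩ := h j (by simp)
    have hstep : cellStep matrix m n i (o, a1, a2, an) j =
        (o, a1, a2 ++ [pvGet matrix i j], an) := by
      simp only [cellStep]
      rw [if_neg h1, if_neg h2, if_pos hi]
    rw [List.foldl_cons, hstep, ih (fun x hx => h x (List.mem_cons_of_mem _ hx))]
    simp

-- splitting range(0, k) as 0 :: interior ++ [k-1] for k ≥ 2
theorem pv_range_split (k : Int) (hk : 2 ≤ k) :
    PySem.List.pyRange 0 k 1 = 0 :: (PySem.List.pyRange 1 (k - 1) 1 ++ [k - 1]) := by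
  rw [PySem.List.pyRange_one_cons (by omega : (0:Int) < k)]
  have h01 : (0 : Int) + 1 = 1 := by norm_num
  rw [h01, PySem.List.pyRange_one_append 1 (k - 1) k (by omega) (by omega)]
  have hsing : PySem.List.pyRange (k - 1) k = [k - 1] := by
    rw [PySem.List.pyRange_one]
    have h1 : (k - (k - 1)).toNat = 1 := by omega
    rw [h1]
    simp
  rw [hsing]

-- the whole j-loop for the top row i = 0
theorem pv_rowStep_top (matrix : List (List Int)) (m n : Int)
    (o a1 a2 : List Int) (mn : List (List Int)) :
    rowStep matrix m n (o, a1, a2, mn) 0 =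
      (o ++ (PySem.List.pyRange 0 n 1).map (pvGet matrix 0), a1, a2, mn) := by
  simp only [rowStep]
  rw [pv_foldCell_first matrix m n 0 (PySem.List.pyRange 0 n 1) (fun j _ => Or.inl rfl)]
  simp

-- the whole j-loop for a middle row (0 < i, i ≠ m-1), n ≥ 2
theorem pv_innerFold_mid (matrix : List (List Int)) (m n i : Int)
    (hi : 0 < i) (him : i ≠ m - 1) (hn : 2 ≤ n) (o a1 a2 : List Int) :
    (PySem.List.pyRange 0 n 1).foldl (cellStep matrix m n i) (o, a1, a2, []) =
      (o ++ [pvGet matrix i (n - 1)], a1 ++ [pvGet matrix i 0], a2,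
        (PySem.List.pyRange 1 (n - 1) 1).map (pvGet matrix i)) := by
  rw [pv_range_split n hn, List.foldl_cons]
  have hstep : cellStep matrix m n i (o, a1, a2, []) 0 =
      (o, a1 ++ [pvGet matrix i 0], a2, []) := by
    simp only [cellStep]
    rw [if_neg (show ¬(i = 0 ∨ (0:Int) = n - 1) by omega)]
    simp
  rw [hstep, List.foldl_append,
    pv_foldCell_interior matrix m n i (PySem.List.pyRange 1 (n - 1) 1)
      (fun j hj => by
        rw [PySem.List.mem_pyRange_one] at hj
        exact ⟨by omega, by omega, him⟩)
      o (a1 ++ [pvGet matrix i 0]) a2 [],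
    List.foldl_cons, List.foldl_nil]
  have hlast : cellStep matrix m n i
      (o, a1 ++ [pvGet matrix i 0], a2,
        [] ++ (PySem.List.pyRange 1 (n - 1) 1).map (pvGet matrix i)) (n - 1) =
      (o ++ [pvGet matrix i (n - 1)], a1 ++ [pvGet matrix i 0], a2,
        (PySem.List.pyRange 1 (n - 1) 1).map (pvGet matrix i)) := by
    simp [cellStep]
  rw [hlast]

-- the whole j-loop for the bottom row i = m-1 ≠ 0, n ≥ 2
theorem pv_innerFold_bottom (matrix : List (List Int)) (m n i : Int)
    (hi : 0 < i) (him : i = m - 1) (hn : 2 ≤ n) (o a1 a2 : List Int) :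
    (PySem.List.pyRange 0 n 1).foldl (cellStep matrix m n i) (o, a1, a2, []) =
      (o ++ [pvGet matrix i (n - 1)], a1 ++ [pvGet matrix i 0],
        a2 ++ (PySem.List.pyRange 1 (n - 1) 1).map (pvGet matrix i), []) := by
  rw [pv_range_split n hn, List.foldl_cons]
  have hstep : cellStep matrix m n i (o, a1, a2, []) 0 =
      (o, a1 ++ [pvGet matrix i 0], a2, []) := by
    simp only [cellStep]
    rw [if_neg (show ¬(i = 0 ∨ (0:Int) = n - 1) by omega)]
    simp
  rw [hstep, List.foldl_append,
    pv_foldCell_bottom matrix m n i (PySem.List.pyRange 1 (n - 1) 1) him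
      (fun j hj => by
        rw [PySem.List.mem_pyRange_one] at hj
        exact ⟨by omega, by omega⟩)
      o (a1 ++ [pvGet matrix i 0]) a2 [],
    List.foldl_cons, List.foldl_nil]
  have hlast : cellStep matrix m n i
      (o, a1 ++ [pvGet matrix i 0],
        a2 ++ (PySem.List.pyRange 1 (n - 1) 1).map (pvGet matrix i), []) (n - 1) =
      (o ++ [pvGet matrix i (n - 1)], a1 ++ [pvGet matrix i 0],
        a2 ++ (PySem.List.pyRange 1 (n - 1) 1).map (pvGet matrix i), []) := by
    simp [cellStep]
  rw [hlast]

-- the whole j-loop then matrixnew update for the bottom row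
theorem pv_rowStep_bottom (matrix : List (List Int)) (m n : Int)
    (hm : 2 ≤ m) (hn : 2 ≤ n) (o a1 a2 : List Int) (mn : List (List Int)) :
    rowStep matrix m n (o, a1, a2, mn) (m - 1) =
      (o ++ [pvGet matrix (m - 1) (n - 1)], a1 ++ [pvGet matrix (m - 1) 0],
        a2 ++ (PySem.List.pyRange 1 (n - 1) 1).map (pvGet matrix (m - 1)), mn) := by
  simp only [rowStep]
  rw [pv_innerFold_bottom matrix m n (m - 1) (by omega) rfl hn o a1 a2]
  simp

-- matrixnew update: append-if-nonempty is append-filter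
theorem pv_app_if (mn : List (List Int)) (x : List Int) :
    (if x.length ≠ 0 then mn ++ [x] else mn) = mn ++ [x].filter (· ≠ []) := by
  by_cases hx : x = []
  · subst hx; simp
  · simp [hx, List.length_eq_zero_iff]

-- the whole i-loop when n = 1: every cell has j = 0 = n-1, everything lands in outer_ring_values
theorem pv_foldRow_n1 (matrix : List (List Int)) (m : Int) (l : List Int) :
    ∀ (o a1 a2 : List Int) (mn : List (List Int)),
      l.foldl (rowStep matrix m 1) (o, a1, a2, mn) =
        (o ++ l.map (fun i => pvGet matrix i 0), a1, a2, mn) := by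
  induction l with
  | nil => intro o a1 a2 mn; simp
  | cons i t ih =>
    intro o a1 a2 mn
    have hrow : rowStep matrix m 1 (o, a1, a2, mn) i = (o ++ [pvGet matrix i 0], a1, a2, mn) := by
      simp only [rowStep]
      have h1 : PySem.List.pyRange 0 (1:Int) = [0] := by
        have := PySem.List.pyRange_one_singleton (0:Int)
        norm_num at this
        exact this
      rw [h1, List.foldl_cons, List.foldl_nil]
      have hstep : cellStep matrix m 1 i (o, a1, a2, []) 0 =
          (o ++ [pvGet matrix i 0], a1, a2, []) := by
        simp only [cellStep]
        rw [if_pos (Or.inr (show (0:Int) = 1 - 1 by omega))]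
      rw [hstep]
      simp
    rw [List.foldl_cons, hrow, ih]
    simp

-- the i-loop over middle rows (0 < i, i ≠ m-1): each adds one right-column and one
-- left-column value, and its interior to matrixnew when nonempty
theorem pv_foldRow_mid (matrix : List (List Int)) (m n : Int) (hn : 2 ≤ n) (l : List Int)
    (h : ∀ i ∈ l, 0 < i ∧ i ≠ m - 1) :
    ∀ (o a1 a2 : List Int) (mn : List (List Int)),
      l.foldl (rowStep matrix m n) (o, a1, a2, mn) =
        (o ++ l.map (fun i => pvGet matrix i (n - 1)), a1 ++ l.map (fun i => pvGet matrix i 0), a2,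
          mn ++ (l.map (fun i => (PySem.List.pyRange 1 (n - 1) 1).map (pvGet matrix i))).filter
            (· ≠ [])) := by
  induction l with
  | nil => intro o a1 a2 mn; simp
  | cons i t ih =>
    intro o a1 a2 mn
    obtain ⟨hi, him⟩ := h i (by simp)
    have hrow : rowStep matrix m n (o, a1, a2, mn) i =
        (o ++ [pvGet matrix i (n - 1)], a1 ++ [pvGet matrix i 0], a2,
          mn ++ ([(PySem.List.pyRange 1 (n - 1) 1).map (pvGet matrix i)].filter (· ≠ []))) := by
      simp only [rowStep]
      rw [pv_innerFold_mid matrix m n i hi him hn o a1 a2]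
      rw [pv_app_if]
    rw [List.foldl_cons, hrow, ih (fun x hx => h x (List.mem_cons_of_mem _ hx))]
    by_cases hx : (PySem.List.pyRange 1 (n - 1) 1).map (pvGet matrix i) = []
    · simp [hx]
    · simp [hx]

-- ===== VERDICT (by name: the statement is the Claim_ definition above) =====
theorem outline_spec : Claim_equal_outline := by
  intro matrix m n _ hpre
  show outline matrix m n = outline_alt matrix m n
  by_cases hn0 : n ≤ 0
  · -- n ≤ 0: the j-loop never runs, both results are ([], [])
    have hrow : ∀ st i, rowStep matrix m n st i = st := by
      intro st i
      simp [rowStep, PySem.List.pyRange_one_eq_nil hn0]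
    have hfold : (PySem.List.pyRange 0 m 1).foldl (rowStep matrix m n)
        ([], [], [], []) = ([], [], [], []) := by
      rw [PySem.List.foldl_congr_mem (PySem.List.pyRange 0 m 1) (rowStep matrix m n)
        (fun st _ => st) ([], [], [], []) (fun acc x _ => hrow acc x)]
      exact PySem.List.foldl_ignore _ _
    simp [outline, outline_alt, hfold, hn0, PySem.List.slice?_none_none_neg_one]
  · replace hn0 : 0 < n := by omega
    obtain ⟨hml, hrows⟩ := hpre hn0
    have hrowlen : ∀ i : Int, 0 ≤ i → i < m →
        n ≤ ((PySem.List.pyGetD matrix i []).length : Int) := by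
      intro i h0 h1
      have hlt : i < (matrix.length : Int) := lt_of_lt_of_le h1 hml
      rw [PySem.List.pyGetD_eq_getElem matrix [] h0 hlt]
      have hi2 : i.toNat < (matrix.take m.toNat).length := by
        simp [List.length_take]
        omega
      have hmem := List.getElem_mem hi2
      rw [List.getElem_take] at hmem
      exact hrows _ hmem
    by_cases hm0 : m ≤ 0
    · -- m ≤ 0: the i-loop never runs
      rw [outline, outline_alt, PySem.List.pyRange_one_eq_nil hm0]
      simp [hm0, PySem.List.slice?_none_none_neg_one]
    · replace hm0 : 0 < m := by omega
      have hBneg : ¬(m ≤ 0 ∨ n ≤ 0) := by omega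
      by_cases hn1 : n = 1
      · -- single-column matrix: the whole column is the ring, interior empty
        subst hn1
        rw [outline, outline_alt]
        rw [pv_foldRow_n1 matrix m (PySem.List.pyRange 0 m 1)]
        rw [if_neg hBneg]
        have htop : PySem.List.slice (PySem.List.pyGetD matrix 0 []) none (some 1) =
            [pvGet matrix 0 0] := by
          rw [← PySem.List.slice_zero_start,
            ← pv_map_pyGetD_slice _ 0 1 (by omega) (by omega) (hrowlen 0 (by omega) hm0)]
          have h01 : PySem.List.pyRange 0 (1:Int) = [0] := by
            have := PySem.List.pyRange_one_singleton (0:Int)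
            norm_num at this
            exact this
          rw [h01]
          simp [pvGet]
        have hsplitm : PySem.List.pyRange 0 m 1 = 0 :: PySem.List.pyRange 1 m 1 := by
          rw [PySem.List.pyRange_one_cons hm0]
          norm_num
        have hinner : ∀ i ∈ PySem.List.pyRange 1 (m - 1) 1,
            PySem.List.slice (PySem.List.pyGetD matrix i []) (some 1) (some ((1:Int) - 1)) =
              (fun _ : Int => ([] : List Int)) i := by
          intro i _
          rw [PySem.List.slice_toNat _ (by omega) (by omega)]
          simp
        have hmap := List.map_congr_left hinner
        rw [htop, hsplitm, hmap]
        simp [PySem.List.slice?_none_none_neg_one, pvGet]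
      · -- n ≥ 2
        have hn2 : 2 ≤ n := by omega
        rw [outline, outline_alt, if_neg hBneg]
        have htop : PySem.List.slice (PySem.List.pyGetD matrix 0 []) none (some n) =
            (PySem.List.pyRange 0 n 1).map (pvGet matrix 0) := by
          rw [← PySem.List.slice_zero_start,
            ← pv_map_pyGetD_slice _ 0 n (by omega) (by omega) (hrowlen 0 (by omega) hm0)]
          rfl
        by_cases hm1 : m = 1
        · -- single row: the whole row is the ring, interior empty
          subst hm1
          have h01 : PySem.List.pyRange 0 (1:Int) = [0] := by
            have := PySem.List.pyRange_one_singleton (0:Int)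
            norm_num at this
            exact this
          rw [h01, List.foldl_cons, List.foldl_nil, pv_rowStep_top]
          have e4 : PySem.List.pyRange 1 (1:Int) = [] :=
            PySem.List.pyRange_one_eq_nil (by omega)
          simp [htop, e4, PySem.List.slice?_none_none_neg_one,
            show (1:Int) < n by omega]
        · -- m ≥ 2, n ≥ 2: the general ring
          have hm2 : 2 ≤ m := by omega
          rw [pv_range_split m hm2, List.foldl_cons, pv_rowStep_top, List.foldl_append,
            pv_foldRow_mid matrix m n hn2 (PySem.List.pyRange 1 (m - 1) 1)
              (fun i hi => by
                rw [PySem.List.mem_pyRange_one] at hi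
                exact ⟨by omega, by omega⟩),
            List.foldl_cons, List.foldl_nil, pv_rowStep_bottom matrix m n hm2 hn2]
          have hrightcol : (PySem.List.pyRange 1 m 1).map (fun i => pvGet matrix i (n - 1)) =
              (PySem.List.pyRange 1 (m - 1) 1).map (fun i => pvGet matrix i (n - 1)) ++
                [pvGet matrix (m - 1) (n - 1)] := by
            rw [PySem.List.pyRange_one_append 1 (m - 1) m (by omega) (by omega)]
            have hsing : PySem.List.pyRange (m - 1) m = [m - 1] := by
              rw [PySem.List.pyRange_one]
              have h1 : (m - (m - 1)).toNat = 1 := by omega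
              rw [h1]
              simp
            rw [hsing]
            simp
          have hleftcol : (PySem.List.pyRange (m - 1) 0 (-1)).map (fun i => pvGet matrix i 0) =
              ((PySem.List.pyRange 1 (m - 1) 1).map (fun i => pvGet matrix i 0) ++
                [pvGet matrix (m - 1) 0]).reverse := by
            have h5 : (PySem.List.pyRange 1 (m - 1) 1).map (fun i => pvGet matrix i 0) ++
                [pvGet matrix (m - 1) 0] =
                (PySem.List.pyRange 1 m 1).map (fun i => pvGet matrix i 0) := by
              rw [PySem.List.pyRange_one_append 1 (m - 1) m (by omega) (by omega)]
              have hsing : PySem.List.pyRange (m - 1) m = [m - 1] := by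
                rw [PySem.List.pyRange_one]
                have h1 : (m - (m - 1)).toNat = 1 := by omega
                rw [h1]
                simp
              rw [hsing]
              simp
            rw [h5]
            have h6 := pv_map_rev (fun i => pvGet matrix i 0) 1 m
            norm_num at h6
            rw [h6]
          have hbottom : (PySem.List.pyRange (n - 2) 0 (-1)).map (fun j => pvGet matrix (m - 1) j) =
              ((PySem.List.pyRange 1 (n - 1) 1).map (pvGet matrix (m - 1))).reverse := by
            have h6 := pv_map_rev (fun j => pvGet matrix (m - 1) j) 1 (n - 1)
            rw [show n - 1 - 1 = n - 2 by ring, show (1:Int) - 1 = 0 by norm_num] at h6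
            exact h6.symm
          have hinner : ∀ i ∈ PySem.List.pyRange 1 (m - 1) 1,
              PySem.List.slice (PySem.List.pyGetD matrix i []) (some 1) (some (n - 1)) =
                (fun i => (PySem.List.pyRange 1 (n - 1) 1).map (pvGet matrix i)) i := by
            intro i hi
            rw [PySem.List.mem_pyRange_one] at hi
            rw [← pv_map_pyGetD_slice _ 1 (n - 1) (by omega) (by omega)
              (by have := hrowlen i (by omega) (by omega); omega)]
            rfl
          have hmapinner := List.map_congr_left hinner
          rw [PySem.List.slice?_none_none_neg_one, PySem.List.slice?_none_none_neg_one]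
          simp only [Option.getD_some]
          rw [htop, hrightcol, hleftcol, hbottom, hmapinner,
            if_pos (show (1:Int) < m by omega), if_pos (show (1:Int) < n by omega)]
          simp [List.append_assoc]
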